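-- pv_equiv track=rewrite | github.com/Jass2345/ASCII_Chess | ascii_chess/gui.py | _moves_to_text
-- ===== SOURCE A (Python) =====
-- from typing import List, Optional
--
-- def _moves_to_text(moves: List[str]) -> str:
--     if not moves:
--         return "<no moves yet>"
--     lines = []
--     for idx in range(0, len(moves), 2):
--         white = moves[idx]
--         black = moves[idx + 1] if idx + 1 < len(moves) else ""
--         lines.append(f"{idx // 2 + 1:>2}. {white:<8} {black:<8}")
--     return "\n".join(lines)
-- ===== SOURCE B (Python) =====
-- def _moves_to_text(moves):
--     if not moves:
--         return "<no moves yet>"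
--     whites = moves[0::2]
--     blacks = moves[1::2] + [""] * (len(moves) % 2)
--     return "\n".join(
--         f"{i:>2}. {w:<8} {b:<8}"
--         for i, (w, b) in enumerate(zip(whites, blacks), 1)
--     )
-- ===== Notes on version B (the rewrite author's own statement) =====
-- stated objective: alternative
-- what changed: Replaces the index loop stepping by 2 with bounds checks by slicing the list into white/black half-move columns, padding the black column on odd length, and zipping+enumerating the pairs into lines.
import Mathlib
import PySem

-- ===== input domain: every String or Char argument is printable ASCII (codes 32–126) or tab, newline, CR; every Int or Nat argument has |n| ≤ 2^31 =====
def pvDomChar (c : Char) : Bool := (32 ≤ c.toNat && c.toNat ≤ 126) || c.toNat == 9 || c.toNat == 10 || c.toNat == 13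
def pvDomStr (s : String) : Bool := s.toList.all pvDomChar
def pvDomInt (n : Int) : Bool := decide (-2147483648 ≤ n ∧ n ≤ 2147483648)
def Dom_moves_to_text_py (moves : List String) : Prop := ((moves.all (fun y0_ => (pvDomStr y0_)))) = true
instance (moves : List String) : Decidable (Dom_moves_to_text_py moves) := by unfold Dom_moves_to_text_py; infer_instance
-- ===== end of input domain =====

-- B slices the move list into white/black columns, pads the black column on odd length,
-- and zips+enumerates the pairs into lines (alternative decomposition; same cost as A).


-- shared formatting helper for the f-string f"{n:>2}. {white:<8} {black:<8}" that appears
-- verbatim in both Pythons: hand-written space padding over List Char (exact: Python pads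
-- str(n) on the left to width 2 and each move on the right to width 8, by code points).
def pvFmtLine (n : Int) (white black : String) : String :=
  String.ofList (List.replicate (2 - (PySem.Int.toChars n).length) ' ' ++ PySem.Int.toChars n
    ++ ". ".toList
    ++ white.toList ++ List.replicate (8 - white.toList.length) ' '
    ++ [' ']
    ++ black.toList ++ List.replicate (8 - black.toList.length) ' ')

-- ===== PORT A =====
def moves_to_text_py (moves : List String) : String :=
  if moves = [] then "<no moves yet>"
  else
    let lines := (PySem.List.pyRange 0 (moves.length : Int) 2).foldl
      (fun lines idx =>
        let white := PySem.List.pyGetD moves idx ""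
        let black := if idx + 1 < (moves.length : Int) then PySem.List.pyGetD moves (idx + 1) "" else ""
        lines ++ [pvFmtLine (PySem.Int.floordiv idx 2 + 1) white black]) []
    PySem.Str.join "\n" lines

-- ===== PORT B =====
def moves_to_text_py_alt (moves : List String) : String :=
  if moves = [] then "<no moves yet>"
  else
    let whites := (PySem.List.slice? moves (some 0) none 2).getD []
    let blacks := (PySem.List.slice? moves (some 1) none 2).getD []
      ++ List.replicate (moves.length % 2) ""
    PySem.Str.join "\n"
      ((PySem.List.enumerate (whites.zip blacks) 1).map
        (fun p => pvFmtLine p.1 p.2.1 p.2.2))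

-- ===== PRECONDITION & SPEC =====
def Spec_moves_to_text_py (moves : List String) (out : String) : Prop := out = moves_to_text_py_alt moves
instance (moves : List String) (out : String) : Decidable (Spec_moves_to_text_py moves out) := by unfold Spec_moves_to_text_py; infer_instance

-- ===== CLAIM (what is proved, stated in full; the proofs are below) =====
def Claim_equal_moves_to_text_py : Prop := ∀ (moves : List String), Dom_moves_to_text_py moves → Spec_moves_to_text_py moves (moves_to_text_py moves)

-- ===== LEMMAS AND PROOFS =====

-- whites column: xs[0::2] is the even-indexed elements
theorem pv_slice_even (xs : List String) :
    (PySem.List.slice? xs (some 0) none 2).getD []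
      = (List.range ((xs.length + 1) / 2)).map (fun k => xs.getD (2 * k) "") := by
  simp only [PySem.List.slice?, PySem.List.sliceIndices]
  norm_num
  rw [show (if 0 < xs.length then (((xs.length : Int) + 2 - 1) / 2).toNat else 0)
        = (xs.length + 1) / 2 by split <;> omega]
  rw [List.filterMap_congr (g := fun (k : Nat) => some (xs[2*k]?.getD ""))]
  · simp
  · intro k hk
    simp only [List.mem_range] at hk
    have h2 : 2 * k < xs.length := by omega
    rw [show ((2 * (k:Int)).toNat) = 2 * k by omega]
    rw [List.getElem?_eq_getElem h2]
    simp

-- blacks column: xs[1::2] is the odd-indexed elements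
theorem pv_slice_odd (xs : List String) :
    (PySem.List.slice? xs (some 1) none 2).getD []
      = (List.range (xs.length / 2)).map (fun k => xs.getD (2 * k + 1) "") := by
  simp only [PySem.List.slice?, PySem.List.sliceIndices]
  norm_num
  by_cases hl : 1 < xs.length
  · rw [if_pos hl]
    have hm : min 1 (xs.length : Int) = 1 := by omega
    simp only [hm]
    rw [show (((xs.length : Int) - 1 + 2 - 1) / 2).toNat = xs.length / 2 by omega]
    rw [List.filterMap_congr (g := fun (k : Nat) => some (xs[2*k+1]?.getD ""))]
    · simp
    · intro k hk
      simp only [List.mem_range] at hk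
      have h2 : 2 * k + 1 < xs.length := by omega
      rw [show ((1 + 2 * (k:Int)).toNat) = 2 * k + 1 by omega]
      rw [List.getElem?_eq_getElem h2]
      simp
  · rw [if_neg hl, show xs.length / 2 = 0 by omega]
    simp

-- blacks column padded with "" on odd length, re-indexed over the whites range
theorem pv_blacks_padded (xs : List String) :
    (List.range (xs.length / 2)).map (fun k => xs.getD (2 * k + 1) "")
        ++ List.replicate (xs.length % 2) ""
      = (List.range ((xs.length + 1) / 2)).map
          (fun k => if 2 * k + 1 < xs.length then xs.getD (2 * k + 1) "" else "") := by
  by_cases hp : xs.length % 2 = 0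
  · rw [hp, show (xs.length + 1) / 2 = xs.length / 2 by omega]
    simp only [List.replicate_zero, List.append_nil]
    apply List.map_congr_left
    intro k hk
    simp only [List.mem_range] at hk
    rw [if_pos (by omega)]
  · rw [show xs.length % 2 = 1 by omega, show (xs.length + 1) / 2 = xs.length / 2 + 1 by omega]
    rw [List.range_succ, List.map_append]
    congr 1
    · apply List.map_congr_left
      intro k hk
      simp only [List.mem_range] at hk
      rw [if_pos (by omega)]
    · simp only [List.map_cons, List.map_nil, List.replicate_one]
      rw [if_neg (by omega)]

theorem pv_map_enumerate_map {α β γ : Type} (xs : List α) (p : α → β) (F : Int × β → γ) (s : Int) :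
    (PySem.List.enumerate (xs.map p) s).map F
      = (PySem.List.enumerate xs s).map (fun q => F (q.1, p q.2)) := by
  induction xs generalizing s with
  | nil => simp [PySem.List.enumerate_nil]
  | cons x xs ih => simp [PySem.List.enumerate_cons, ih]

theorem pv_map_enumerate_range {γ : Type} (n : Nat) (F : Int × Nat → γ) (s : Int) :
    (PySem.List.enumerate (List.range n) s).map F
      = (List.range n).map (fun (k : Nat) => F (s + (k : Int), k)) := by
  induction n generalizing F s with
  | zero => simp [PySem.List.enumerate_nil]
  | succ n ih =>
    rw [List.range_succ_eq_map, PySem.List.enumerate_cons]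
    simp only [List.map_cons]
    rw [pv_map_enumerate_map]
    rw [ih (fun (q : Int × Nat) => F (q.1, q.2 + 1)) (s + 1)]
    simp only [List.map_map]
    congr 1
    · push_cast; ring_nf
    apply List.map_congr_left
    intro k _
    simp only [Function.comp_apply]
    have h : s + 1 + (k : Int) = s + ((k + 1 : Nat) : Int) := by push_cast; ring
    rw [h]

theorem moves_to_text_eq (moves : List String) :
    moves_to_text_py moves = moves_to_text_py_alt moves := by
  by_cases h : moves = []
  · simp [moves_to_text_py, moves_to_text_py_alt, h]
  · simp only [moves_to_text_py, moves_to_text_py_alt, if_neg h]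
    congr 1
    rw [pv_slice_even, pv_slice_odd, pv_blacks_padded, List.zip_map']
    rw [pv_map_enumerate_map, pv_map_enumerate_range]
    rw [PySem.List.foldl_append_singleton_eq_map]
    rw [PySem.List.pyRange_of_pos 0 (moves.length : Int) (by norm_num)]
    rw [show (if (0:Int) < (moves.length : Int)
          then (((moves.length : Int) - 0 + 2 - 1) / 2).toNat else 0)
        = (moves.length + 1) / 2 by split <;> omega]
    rw [List.map_map, List.nil_append]
    apply List.map_congr_left
    intro k hk
    simp only [List.mem_range, Function.comp_apply] at hk ⊢
    have e0 : (0:Int) + 2 * (k:Int) = ((2 * k : Nat) : Int) := by push_cast; ring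
    rw [e0]
    rw [show PySem.Int.floordiv ((2 * k : Nat) : Int) 2 + 1 = 1 + (k : Int) by
          rw [PySem.Int.floordiv_eq_ediv_of_pos (by norm_num)]; omega]
    rw [PySem.List.pyGetD_natCast]
    have e1 : ((2 * k : Nat) : Int) + 1 = ((2 * k + 1 : Nat) : Int) := by push_cast; ring
    rw [e1, PySem.List.pyGetD_natCast]
    by_cases hc : 2 * k + 1 < moves.length
    · rw [if_pos (by exact_mod_cast hc), if_pos hc]
    · rw [if_neg (by exact_mod_cast hc), if_neg hc]

-- ===== VERDICT (by name: the statement is the Claim_ definition above) =====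
theorem moves_to_text_py_spec : Claim_equal_moves_to_text_py := by
  intro moves _
  unfold Spec_moves_to_text_py
  exact moves_to_text_eq moves
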